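-- pv_equiv track=rewrite | github.com/Timosbonus/AdventOfCode | 2024/DayTwo.py | checkDecreaseTwo
-- ===== SOURCE A (Python) =====
-- def checkDecrease(nums):
--     for i in range(len(nums) - 1):
--         if nums[i + 1] >= nums[i] or nums[i] - nums[i + 1] > 3:
--             return False
--     return True
--
-- def checkDecreaseTwo(nums):
--     if checkDecrease(nums) == True:
--         return True
--     else:
--         for i in range(len(nums) - 1):
--             if nums[i] <= nums[i + 1] or nums[i] - nums[i + 1] > 3:
--                 if checkDecrease(nums[:i] + nums[i + 1:]) or len(nums) - i - 2 >= 0 and checkDecrease(nums[:i + 1] + nums[i + 2:]):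
--                     return True
--                 break
--
--     return False
-- ===== SOURCE B (Python) =====
-- def checkDecreaseTwo(nums):
--     def ok(seq):
--         return all(1 <= a - b <= 3 for a, b in zip(seq, seq[1:]))
--     return ok(nums) or any(ok(nums[:i] + nums[i + 1:]) for i in range(len(nums)))
--
-- def checkDecrease(nums):
--     return all(1 <= a - b <= 3 for a, b in zip(nums, nums[1:]))
-- ===== Notes on version B (the rewrite author's own statement) =====
-- stated objective: idiomatic
-- what changed: Replaced A's find-first-violation-then-try-two-targeted-repairs-and-break loop (with an index-based validity scan) by a uniform brute-force sweep: the validity test is a zip-over-adjacent-pairs all(), and the dampener tests every single-element removal with any().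
import Mathlib
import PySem

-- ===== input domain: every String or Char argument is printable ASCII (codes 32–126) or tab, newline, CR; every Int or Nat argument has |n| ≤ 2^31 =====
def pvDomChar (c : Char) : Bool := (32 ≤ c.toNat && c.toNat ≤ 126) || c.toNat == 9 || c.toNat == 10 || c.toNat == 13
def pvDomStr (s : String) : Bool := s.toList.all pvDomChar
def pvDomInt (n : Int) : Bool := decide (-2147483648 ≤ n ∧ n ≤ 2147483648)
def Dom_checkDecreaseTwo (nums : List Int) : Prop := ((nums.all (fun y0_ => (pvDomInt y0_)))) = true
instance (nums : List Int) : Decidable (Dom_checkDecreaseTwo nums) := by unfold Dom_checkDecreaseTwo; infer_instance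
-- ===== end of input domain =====

-- B replaces A's find-first-violation-then-try-two-targeted-repairs loop by an idiomatic
-- brute-force sweep over all single-element removals, with a zip-over-adjacent-pairs
-- validity test instead of A's index loop; same results, no speed claim.

-- ===== PORT A =====
-- A's helper checkDecrease: index loop over range(len-1) with early return False
def pvCheckDecrease (nums : List Int) : Bool :=
  (PySem.List.pyRange 0 ((nums.length : Int) - 1)).all fun i =>
    !(decide (PySem.List.pyGetD nums (i + 1) 0 ≥ PySem.List.pyGetD nums i 0) ||
      decide (PySem.List.pyGetD nums i 0 - PySem.List.pyGetD nums (i + 1) 0 > 3))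

-- nums[:i] + nums[i+1:]  (A's slicing)
def pvDel (nums : List Int) (i : Int) : List Int :=
  PySem.List.slice nums none (some i) ++ PySem.List.slice nums (some (i + 1)) none

-- A's for-loop: first index satisfying the condition decides the result (break), else False
def pvLoopA (nums : List Int) : List Int → Bool
  | [] => false
  | i :: rest =>
    if decide (PySem.List.pyGetD nums i 0 ≤ PySem.List.pyGetD nums (i + 1) 0) ||
       decide (PySem.List.pyGetD nums i 0 - PySem.List.pyGetD nums (i + 1) 0 > 3) then
      pvCheckDecrease (pvDel nums i) ||
        (decide ((nums.length : Int) - i - 2 ≥ 0) && pvCheckDecrease (pvDel nums (i + 1)))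
    else pvLoopA nums rest

def checkDecreaseTwo (nums : List Int) : Bool :=
  if pvCheckDecrease nums = true then true
  else pvLoopA nums (PySem.List.pyRange 0 ((nums.length : Int) - 1))

-- ===== PORT B =====
-- B's helper ok: all(1 <= a - b <= 3 for a, b in zip(seq, seq[1:]))
def pvOk (seq : List Int) : Bool :=
  (seq.zip (seq.drop 1)).all fun p => decide (1 ≤ p.1 - p.2) && decide (p.1 - p.2 ≤ 3)

-- ok(nums) or any(ok(nums[:i] + nums[i+1:]) for i in range(len(nums)))
def checkDecreaseTwo_alt (nums : List Int) : Bool :=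
  pvOk nums ||
    (List.range nums.length).any fun i => pvOk (nums.take i ++ nums.drop (i + 1))

-- ===== PRECONDITION & SPEC =====
def Spec_checkDecreaseTwo (nums : List Int) (out : Bool) : Prop := out = checkDecreaseTwo_alt nums
instance (nums : List Int) (out : Bool) : Decidable (Spec_checkDecreaseTwo nums out) := by unfold Spec_checkDecreaseTwo; infer_instance

-- ===== CLAIM (what is proved, stated in full; the proofs are below) =====
def Claim_equal_checkDecreaseTwo : Prop := ∀ (nums : List Int), Dom_checkDecreaseTwo nums → Spec_checkDecreaseTwo nums (checkDecreaseTwo nums)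

-- ===== LEMMAS AND PROOFS =====

-- the pair-violation test at Nat index i
def pvViolN (nums : List Int) (i : Nat) : Bool :=
  decide (nums.getD (i + 1) 0 ≥ nums.getD i 0) || decide (nums.getD i 0 - nums.getD (i + 1) 0 > 3)

lemma pvRange_len (n : Nat) :
    PySem.List.pyRange 0 ((n : Int) - 1) = (List.range (n - 1)).map (fun (k : Nat) => (k : Int)) := by
  cases n with
  | zero => decide
  | succ m =>
    have h : ((m + 1 : Nat) : Int) - 1 = (m : Int) := by push_cast; ring
    have h2 : m + 1 - 1 = m := rfl
    rw [h, h2, PySem.List.pyRange_zero_natCast]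

lemma body_natCast (nums : List Int) (k : Nat) :
    (!(decide (PySem.List.pyGetD nums ((k : Int) + 1) 0 ≥ PySem.List.pyGetD nums (k : Int) 0) ||
      decide (PySem.List.pyGetD nums (k : Int) 0 - PySem.List.pyGetD nums ((k : Int) + 1) 0 > 3))) =
    !pvViolN nums k := by
  have h1 : ((k : Int) + 1) = ((k + 1 : Nat) : Int) := by push_cast; ring
  rw [h1, PySem.List.pyGetD_natCast, PySem.List.pyGetD_natCast]
  rfl

lemma cond_natCast (nums : List Int) (k : Nat) :
    (decide (PySem.List.pyGetD nums (k : Int) 0 ≤ PySem.List.pyGetD nums ((k : Int) + 1) 0) ||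
      decide (PySem.List.pyGetD nums (k : Int) 0 - PySem.List.pyGetD nums ((k : Int) + 1) 0 > 3)) =
    pvViolN nums k := by
  have h1 : ((k : Int) + 1) = ((k + 1 : Nat) : Int) := by push_cast; ring
  rw [h1, PySem.List.pyGetD_natCast, PySem.List.pyGetD_natCast]
  rfl

lemma chk_eq (nums : List Int) :
    pvCheckDecrease nums = (List.range (nums.length - 1)).all (fun i => !pvViolN nums i) := by
  unfold pvCheckDecrease
  rw [pvRange_len, Bool.eq_iff_iff, List.all_eq_true, List.all_eq_true]
  constructor
  · intro hh k hk
    have := hh _ (List.mem_map_of_mem hk)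
    rwa [body_natCast] at this
  · intro hh x hx
    obtain ⟨k, hk, rfl⟩ := List.mem_map.mp hx
    rw [body_natCast]
    exact hh _ hk

-- B's zip-pairs test agrees with A's index-loop test
lemma ok_eq_chk (seq : List Int) : pvOk seq = pvCheckDecrease seq := by
  rw [chk_eq, pvOk, Bool.eq_iff_iff, List.all_eq_true, List.all_eq_true]
  have hz : (seq.zip (seq.drop 1)).length = seq.length - 1 := by
    rw [List.length_zip, List.length_drop]; omega
  constructor
  · intro h i hi
    rw [List.mem_range] at hi
    have hi' : i < (seq.zip (seq.drop 1)).length := by omega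
    have := h _ (List.getElem_mem hi')
    rw [List.getElem_zip, List.getElem_drop] at this
    simp only [Nat.add_comm 1 i] at this
    simp only [Bool.and_eq_true, decide_eq_true_eq] at this
    unfold pvViolN
    rw [List.getD_eq_getElem _ _ (by omega : i + 1 < seq.length),
      List.getD_eq_getElem _ _ (by omega : i < seq.length)]
    simp only [Bool.not_eq_true', Bool.or_eq_false_iff, decide_eq_false_iff_not, not_le, not_lt]
    have h1 := this.1
    have h2 := this.2
    constructor <;> omega
  · intro h p hp
    obtain ⟨i, hi, rfl⟩ := List.mem_iff_getElem.mp hp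
    have hlt : i < seq.length - 1 := by omega
    have := h i (List.mem_range.mpr hlt)
    unfold pvViolN at this
    rw [List.getD_eq_getElem _ _ (by omega : i + 1 < seq.length),
      List.getD_eq_getElem _ _ (by omega : i < seq.length)] at this
    simp only [Bool.not_eq_true', Bool.or_eq_false_iff, decide_eq_false_iff_not, not_le, not_lt] at this
    rw [List.getElem_zip, List.getElem_drop]
    simp only [Nat.add_comm 1 i]
    simp only [Bool.and_eq_true, decide_eq_true_eq]
    constructor <;> omega

lemma chk_false_iff (nums : List Int) :
    pvCheckDecrease nums = false ↔ ∃ i, i < nums.length - 1 ∧ pvViolN nums i = true := by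
  rw [chk_eq]
  simp [List.all_eq_false, List.mem_range]

lemma pvDel_natCast (nums : List Int) (k : Nat) : pvDel nums (k : Int) = nums.eraseIdx k := by
  unfold pvDel
  rw [PySem.List.slice_to _ (by positivity), PySem.List.slice_from _ (by positivity),
    List.eraseIdx_eq_take_drop_succ]
  norm_num

lemma find?_map_cast {p : Int → Bool} (i : Nat) (h2 : p (i : Int) = true)
    (h3 : ∀ j < i, p (j : Int) = false) :
    ∀ m, i < m → ((List.range m).map (fun (k : Nat) => (k : Int))).find? p = some (i : Int) := by
  intro m
  induction m with
  | zero => intro h; omega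
  | succ m ih =>
    intro h1
    rw [List.range_succ, List.map_append, List.find?_append]
    by_cases h : i < m
    · rw [ih h]; rfl
    · have hi : i = m := by omega
      have hnone : ((List.range m).map (fun (k : Nat) => (k : Int))).find? p = none := by
        rw [List.find?_eq_none]
        intro x hx
        obtain ⟨j, hj, rfl⟩ := List.mem_map.mp hx
        simp only [List.mem_range] at hj
        simp [h3 j (by omega)]
      rw [hnone, ← hi]
      simp [h2]

lemma loopA_eq_find (nums : List Int) (L : List Int) :
    pvLoopA nums L =
      ((L.find? (fun i => decide (PySem.List.pyGetD nums i 0 ≤ PySem.List.pyGetD nums (i + 1) 0) ||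
          decide (PySem.List.pyGetD nums i 0 - PySem.List.pyGetD nums (i + 1) 0 > 3))).map
        (fun i => pvCheckDecrease (pvDel nums i) ||
          (decide ((nums.length : Int) - i - 2 ≥ 0) &&
            pvCheckDecrease (pvDel nums (i + 1))))).getD false := by
  induction L with
  | nil => rfl
  | cons i rest ih =>
    simp only [pvLoopA, List.find?_cons]
    by_cases h : (decide (PySem.List.pyGetD nums i 0 ≤ PySem.List.pyGetD nums (i + 1) 0) ||
        decide (PySem.List.pyGetD nums i 0 - PySem.List.pyGetD nums (i + 1) 0 > 3)) = true
    · simp [h]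
    · simp only [Bool.not_eq_true] at h
      simp [h, ih]

-- removing any index other than i₀ or i₀+1 leaves the violating pair (i₀, i₀+1) adjacent
lemma chk_erase_false {nums : List Int} {i₀ j : Nat} (hv : pvViolN nums i₀ = true)
    (hlt : i₀ < nums.length - 1) (hj : j < nums.length) (hne1 : j ≠ i₀) (hne2 : j ≠ i₀ + 1) :
    pvCheckDecrease (nums.eraseIdx j) = false := by
  have hlen : (nums.eraseIdx j).length = nums.length - 1 := by
    rw [List.length_eraseIdx]; simp [hj]
  rw [chk_false_iff]
  rcases Nat.lt_or_ge j i₀ with hcase | hcase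
  · -- j < i₀ : the pair sits at index i₀ - 1 in the shortened list
    obtain ⟨k, rfl⟩ : ∃ k, i₀ = k + 1 := ⟨i₀ - 1, by omega⟩
    refine ⟨k, by omega, ?_⟩
    have e1 : (nums.eraseIdx j).getD k 0 = nums.getD (k + 1) 0 := by
      rw [List.getD_eq_getElem _ _ (by omega), List.getElem_eraseIdx, dif_neg (by omega),
        List.getD_eq_getElem _ _ (by omega)]
    have e2 : (nums.eraseIdx j).getD (k + 1) 0 = nums.getD (k + 1 + 1) 0 := by
      rw [List.getD_eq_getElem _ _ (by omega), List.getElem_eraseIdx, dif_neg (by omega),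
        List.getD_eq_getElem _ _ (by omega)]
    unfold pvViolN at hv ⊢
    rw [e1, e2]
    exact hv
  · -- i₀ + 1 < j : the pair sits at index i₀ unchanged
    have hcase' : i₀ + 1 < j := by omega
    refine ⟨i₀, by omega, ?_⟩
    have e1 : (nums.eraseIdx j).getD i₀ 0 = nums.getD i₀ 0 := by
      rw [List.getD_eq_getElem _ _ (by omega), List.getElem_eraseIdx, dif_pos (by omega),
        List.getD_eq_getElem _ _ (by omega)]
    have e2 : (nums.eraseIdx j).getD (i₀ + 1) 0 = nums.getD (i₀ + 1) 0 := by
      rw [List.getD_eq_getElem _ _ (by omega), List.getElem_eraseIdx, dif_pos (by omega),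
        List.getD_eq_getElem _ _ (by omega)]
    unfold pvViolN at hv ⊢
    rw [e1, e2]
    exact hv

-- ===== VERDICT (by name: the statement is the Claim_ definition above) =====
theorem checkDecreaseTwo_spec : Claim_equal_checkDecreaseTwo := by
  intro nums _
  unfold Spec_checkDecreaseTwo checkDecreaseTwo checkDecreaseTwo_alt
  simp only [ok_eq_chk, ← List.eraseIdx_eq_take_drop_succ]
  by_cases h : pvCheckDecrease nums = true
  · simp [h]
  · have hf : pvCheckDecrease nums = false := by simpa using h
    rw [if_neg h, hf, Bool.false_or]
    have hP : ∃ k, (k < nums.length - 1 ∧ pvViolN nums k = true) := (chk_false_iff nums).mp hf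
    obtain ⟨i₀, ⟨hi₀lt, hi₀v⟩, hmin⟩ :
        ∃ i, (i < nums.length - 1 ∧ pvViolN nums i = true) ∧
          ∀ m < i, ¬(m < nums.length - 1 ∧ pvViolN nums m = true) :=
      ⟨Nat.find hP, Nat.find_spec hP, fun m hm => Nat.find_min hP hm⟩
    have hfirst : ∀ m < i₀, pvViolN nums m = false := by
      intro m hm
      by_contra hc
      exact hmin m hm ⟨by omega, by simpa using hc⟩
    -- A's loop returns the body at the first violating index i₀
    have hfind : (PySem.List.pyRange 0 ((nums.length : Int) - 1)).find?
        (fun i => decide (PySem.List.pyGetD nums i 0 ≤ PySem.List.pyGetD nums (i + 1) 0) ||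
          decide (PySem.List.pyGetD nums i 0 - PySem.List.pyGetD nums (i + 1) 0 > 3)) =
        some (i₀ : Int) := by
      rw [pvRange_len]
      exact find?_map_cast i₀ (by rw [cond_natCast]; exact hi₀v)
        (fun j hj => by rw [cond_natCast]; exact hfirst j hj) _ hi₀lt
    rw [loopA_eq_find, hfind]
    simp only [Option.map_some, Option.getD_some]
    have hguard : decide ((nums.length : Int) - (i₀ : Int) - 2 ≥ 0) = true := by
      rw [decide_eq_true_eq]
      have : i₀ + 2 ≤ nums.length := by omega
      omega
    rw [hguard, Bool.true_and]
    have hcast : ((i₀ : Int) + 1) = ((i₀ + 1 : Nat) : Int) := by push_cast; ring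
    rw [pvDel_natCast, hcast, pvDel_natCast]
    -- B's sweep over all removals collapses to the two candidate removals
    rw [Bool.eq_iff_iff]
    simp only [Bool.or_eq_true, List.any_eq_true, List.mem_range]
    constructor
    · rintro (hA | hA)
      · exact ⟨i₀, by omega, hA⟩
      · exact ⟨i₀ + 1, by omega, hA⟩
    · rintro ⟨k, hk, hB⟩
      by_cases h1 : k = i₀
      · subst h1; exact Or.inl hB
      · by_cases h2 : k = i₀ + 1
        · subst h2; exact Or.inr hB
        · exact absurd hB (by rw [chk_erase_false hi₀v hi₀lt hk h1 h2]; simp)
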